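-- pv_equiv track=rewrite | github.com/suman0474/Ai_Product_Recommender | backend/agentic/workflows/standards_rag/standards_rag_enrichment.py | is_standards_related_question
-- ===== SOURCE A (Python) =====
-- STANDARDS_KEYWORDS = [
--     # Standard codes
--     "iec", "iso", "api", "ansi", "isa", "asme", "nfpa", "ieee", "nist", "en",
--     # Certifications
--     "sil", "atex", "iecex", "ul", "csa", "fm", "ce mark", "nema", "ip rating",
--     # Standards-related terms
--     "standard", "certification", "compliance", "regulation", "requirement",
--     "calibration", "safety integrity", "hazardous area", "explosion proof",
--     "intrinsically safe", "functional safety"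
-- ]
--
-- def is_standards_related_question(question: str) -> bool:
--     """
--     Detect if a user question is related to standards.
--
--     Used by EnGenie workflow to route standards questions to Standards RAG.
--
--     Args:
--         question: User's question text
--
--     Returns:
--         True if the question is standards-related
--     """
--     question_lower = question.lower()
--
--     # Check for standards keywords
--     for keyword in STANDARDS_KEYWORDS:
--         if keyword in question_lower:
--             return True
--
--     # Check for patterns like "what are the ... standards"
--     standards_patterns = [
--         "what standard",
--         "which standard",
--         "what certification",
--         "what is sil",
--         "what is atex",
--         "compliance with",
--         "according to",
--         "requirement for",
--         "specification for",
--     ]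
--
--     for pattern in standards_patterns:
--         if pattern in question_lower:
--             return True
--
--     return False
-- ===== SOURCE B (Python) =====
-- # Idiomatic rewrite: all keywords and routing patterns merged into one constant
-- # tuple, compiled once into a single alternation regex; detection is then one
-- # search of the lowercased question through the compiled automaton.
--
-- import re
--
-- _ALL_TERMS = (
--     # Standard codes
--     "iec", "iso", "api", "ansi", "isa", "asme", "nfpa", "ieee", "nist", "en",
--     # Certifications
--     "sil", "atex", "iecex", "ul", "csa", "fm", "ce mark", "nema", "ip rating",
--     # Standards-related terms
--     "standard", "certification", "compliance", "regulation", "requirement",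
--     "calibration", "safety integrity", "hazardous area", "explosion proof",
--     "intrinsically safe", "functional safety",
--     # Routing patterns
--     "what standard", "which standard", "what certification", "what is sil",
--     "what is atex", "compliance with", "according to", "requirement for",
--     "specification for",
-- )
--
-- _TERMS_RE = re.compile("|".join(re.escape(t) for t in _ALL_TERMS))
--
--
-- def is_standards_related_question(question: str) -> bool:
--     return _TERMS_RE.search(question.lower()) is not None
-- ===== Notes on version B (the rewrite author's own statement) =====
-- stated objective: idiomatic
-- what changed: Instead of two explicit loops doing one substring scan per keyword over two separate lists, B merges all keywords and patterns into one constant tuple compiled once into a single alternation regex and answers with one search of the lowercased question.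
import Mathlib
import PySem

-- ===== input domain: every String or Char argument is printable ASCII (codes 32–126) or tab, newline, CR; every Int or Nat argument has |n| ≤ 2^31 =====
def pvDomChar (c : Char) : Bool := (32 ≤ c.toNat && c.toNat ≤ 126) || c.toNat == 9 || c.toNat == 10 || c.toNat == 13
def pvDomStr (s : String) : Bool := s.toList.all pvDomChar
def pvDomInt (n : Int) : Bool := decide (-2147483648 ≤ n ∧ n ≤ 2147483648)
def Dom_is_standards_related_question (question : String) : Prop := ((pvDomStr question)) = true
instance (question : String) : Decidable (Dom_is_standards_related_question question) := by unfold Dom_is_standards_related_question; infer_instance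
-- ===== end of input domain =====

-- B replaces A's two explicit per-term substring loops by one merged term list compiled
-- into a single alternation regex, answered by one search of the lowercased question
-- (objective: idiomatic).

-- ===== PORT A =====
def STANDARDS_KEYWORDS : List String :=
  ["iec", "iso", "api", "ansi", "isa", "asme", "nfpa", "ieee", "nist", "en",
   "sil", "atex", "iecex", "ul", "csa", "fm", "ce mark", "nema", "ip rating",
   "standard", "certification", "compliance", "regulation", "requirement",
   "calibration", "safety integrity", "hazardous area", "explosion proof",
   "intrinsically safe", "functional safety"]

def is_standards_related_question (question : String) : Bool :=
  let question_lower := PySem.Str.lower question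
  -- first loop with early return: any keyword 'in' question_lower
  if STANDARDS_KEYWORDS.any (fun keyword => PySem.Str.isIn keyword question_lower) then true
  else
    let standards_patterns : List String :=
      ["what standard", "which standard", "what certification", "what is sil",
       "what is atex", "compliance with", "according to", "requirement for",
       "specification for"]
    -- second loop with early return
    if standards_patterns.any (fun pattern => PySem.Str.isIn pattern question_lower) then true
    else false

-- ===== PORT B =====
def ALL_TERMS : List String :=
  ["iec", "iso", "api", "ansi", "isa", "asme", "nfpa", "ieee", "nist", "en",
   "sil", "atex", "iecex", "ul", "csa", "fm", "ce mark", "nema", "ip rating",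
   "standard", "certification", "compliance", "regulation", "requirement",
   "calibration", "safety integrity", "hazardous area", "explosion proof",
   "intrinsically safe", "functional safety",
   "what standard", "which standard", "what certification", "what is sil",
   "what is atex", "compliance with", "according to", "requirement for",
   "specification for"]

-- Hand port of re.search for a '|'-alternation of escaped LITERAL terms (Lean has no
-- regex library): the engine scans positions left to right and at each position tries
-- each alternative as a prefix; exact for literal alternations on this domain.
def regexSearchAlt (terms : List (List Char)) : List Char → Bool
  | [] => terms.any (fun t => t.isPrefixOf ([] : List Char))
  | c :: cs => terms.any (fun t => t.isPrefixOf (c :: cs)) || regexSearchAlt terms cs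

def is_standards_related_question_alt (question : String) : Bool :=
  regexSearchAlt (ALL_TERMS.map String.toList) (PySem.Chars.lower question.toList)

-- ===== PRECONDITION & SPEC =====
def Spec_is_standards_related_question (question : String) (out : Bool) : Prop := out = is_standards_related_question_alt question
instance (question : String) (out : Bool) : Decidable (Spec_is_standards_related_question question out) := by unfold Spec_is_standards_related_question; infer_instance

-- ===== CLAIM (what is proved, stated in full; the proofs are below) =====
def Claim_equal_is_standards_related_question : Prop := ∀ (question : String), Dom_is_standards_related_question question → Spec_is_standards_related_question question (is_standards_related_question question)

-- ===== LEMMAS AND PROOFS =====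

-- the positional scan finds a term iff some term is an infix
theorem regexSearchAlt_eq_any_isIn (terms : List (List Char)) (cs : List Char) :
    regexSearchAlt terms cs = terms.any (fun t => PySem.Chars.isIn t cs) := by
  induction cs with
  | nil =>
      simp only [regexSearchAlt]
      rw [Bool.eq_iff_iff]
      simp [List.isPrefixOf_iff_prefix, PySem.Chars.isIn_iff_infix]
  | cons c cs ih =>
      simp only [regexSearchAlt, ih]
      rw [Bool.eq_iff_iff]
      simp only [Bool.or_eq_true, List.any_eq_true,
        List.isPrefixOf_iff_prefix, PySem.Chars.isIn_iff_infix, List.infix_cons_iff]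
      constructor
      · rintro (⟨t, ht, hp⟩ | ⟨t, ht, hi⟩)
        · exact ⟨t, ht, Or.inl hp⟩
        · exact ⟨t, ht, Or.inr hi⟩
      · rintro ⟨t, ht, hp | hi⟩
        · exact Or.inl ⟨t, ht, hp⟩
        · exact Or.inr ⟨t, ht, hi⟩

theorem all_terms_split : ALL_TERMS =
    STANDARDS_KEYWORDS ++
      ["what standard", "which standard", "what certification", "what is sil",
       "what is atex", "compliance with", "according to", "requirement for",
       "specification for"] := by decide

-- ===== VERDICT (by name: the statement is the Claim_ definition above) =====
theorem is_standards_related_question_spec : Claim_equal_is_standards_related_question := by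
  intro question _
  unfold Spec_is_standards_related_question
  unfold is_standards_related_question is_standards_related_question_alt
  rw [regexSearchAlt_eq_any_isIn, all_terms_split, List.map_append, List.any_append,
    List.any_map, List.any_map]
  rw [Bool.eq_iff_iff]
  simp only [Bool.if_true_left, Bool.if_false_right, Bool.and_true, Bool.or_eq_true,
    List.any_eq_true, Function.comp, PySem.Str.isIn_eq, PySem.Str.toList_lower,
    decide_eq_true_iff]
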